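-- pv_equiv track=rewrite | github.com/StuartRiffle/new-math | collatz-phase.py | get_collatz_odd_sequence
-- ===== SOURCE A (Python) =====
-- def get_collatz_odd_sequence(n_start, max_steps=None):
--     """
--     Generates the sequence of ODD numbers in a Collatz trajectory.
--
--     Args:
--         n_start (int): The starting integer.
--         max_steps (int, optional): The maximum number of total steps (odd and even)
--                                    to compute. Defaults to None (runs until 1).
--
--     Returns:
--         list: A list of the odd integers in the sequence.
--     """
--     if n_start <= 0:
--         return []
--
--     sequence = []
--     n = n_start
--     steps = 0
--
--     while n > 1:
--         if max_steps is not None and steps >= max_steps: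
--             # Also add the final n if we hit max_steps
--             if n % 2 != 0:
--                 sequence.append(n)
--             break
--
--         if n % 2 != 0: # If n is odd
--             sequence.append(n)
--             # Apply the 3n+1 rule
--             n = 3 * n + 1
--         else: # If n is even
--             # Apply the n/2 rule
--             n = n // 2
--         steps += 1
--
--     # Ensure the final "1" is included if the sequence terminates
--     if n == 1 and (max_steps is None or steps < max_steps):
--         # The number 1 is the end point of all successful trajectories
--         # and has a special place in the phase plot.
--         if 1 not in sequence:
--              sequence.append(1)
--
--     return sequence
-- ===== SOURCE B (Python) =====
-- def get_collatz_odd_sequence(n_start, max_steps=None):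
--     if n_start <= 0:
--         return []
--     sequence = []
--     n = n_start
--     steps = 0
--     while n > 1:
--         if max_steps is not None and steps >= max_steps:
--             if n % 2 != 0:
--                 sequence.append(n)
--             break
--         if n % 2 != 0:
--             sequence.append(n)
--             n = 3 * n + 1
--             steps += 1
--         else:
--             tz = (n & -n).bit_length() - 1
--             take = tz if max_steps is None else min(tz, max_steps - steps)
--             n >>= take
--             steps += take
--     if n == 1 and (max_steps is None or steps < max_steps):
--         if 1 not in sequence:
--             sequence.append(1)
--     return sequence
-- ===== Notes on version B (the rewrite author's own statement) =====
-- stated objective: alternative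
-- what changed: B replaces A's one-halving-per-iteration loop by an odd-to-odd walk that counts the trailing zero bits of an even n and removes them in a single shift (capped by the remaining step budget), adding all those halving steps at once.
import Mathlib
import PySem

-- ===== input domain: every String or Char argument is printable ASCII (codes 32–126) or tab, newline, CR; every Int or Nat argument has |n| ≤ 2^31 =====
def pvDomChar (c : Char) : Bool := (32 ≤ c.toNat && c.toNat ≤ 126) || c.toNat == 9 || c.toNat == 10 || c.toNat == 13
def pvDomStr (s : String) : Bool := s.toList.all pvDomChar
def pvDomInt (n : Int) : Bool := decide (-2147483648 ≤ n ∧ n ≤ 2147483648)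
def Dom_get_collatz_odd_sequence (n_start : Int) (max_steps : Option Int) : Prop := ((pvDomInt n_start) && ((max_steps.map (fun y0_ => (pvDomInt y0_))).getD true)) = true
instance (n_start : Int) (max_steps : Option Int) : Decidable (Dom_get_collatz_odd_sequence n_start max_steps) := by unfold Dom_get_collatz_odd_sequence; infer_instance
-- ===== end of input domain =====

-- B batches each maximal run of halvings (the trailing zero bits of an even n, capped by the
-- remaining step budget) into one shift, instead of A's one halving per loop iteration (objective: alternative decomposition).
-- Both loops carry an internal fuel counter (one unit per Collatz step) solely to make them total in Lean.

-- fuel bound shared by both ports (one unit per Collatz step)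
def pvFuel : Nat := 1000000000

-- `max_steps is not None and steps >= max_steps` (same guard in both Pythons)
def pvBudgetHit (ms : Option Int) (steps : Int) : Bool :=
  match ms with
  | none => false
  | some m => decide (m ≤ steps)

-- ===== PORT A =====
-- A's while-loop: one Collatz step (one fuel unit) per iteration; returns (sequence, n, steps)
def pvLoopA : Nat → Option Int → Int → Int → List Int → (List Int × Int × Int)
  | 0, _, n, steps, seq => (seq, n, steps)
  | fuel+1, ms, n, steps, seq =>
    if 1 < n then
      if pvBudgetHit ms steps then
        ((if PySem.Int.mod n 2 ≠ 0 then seq ++ [n] else seq), n, steps)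
      else if PySem.Int.mod n 2 ≠ 0 then
        pvLoopA fuel ms (3 * n + 1) (steps + 1) (seq ++ [n])
      else
        pvLoopA fuel ms (PySem.Int.floordiv n 2) (steps + 1) seq
    else (seq, n, steps)

def get_collatz_odd_sequence (n_start : Int) (max_steps : Option Int) : List Int :=
  if n_start ≤ 0 then []
  else
    match pvLoopA pvFuel max_steps n_start 0 [] with
    | (seq, n, steps) =>
      if (n == 1 && (match max_steps with | none => true | some m => decide (steps < m))) then
        (if (1 : Int) ∈ seq then seq else seq ++ [1])
      else seq

-- ===== PORT B =====
-- number of trailing zero bits: Python's `(n & -n).bit_length() - 1` for n > 0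
def pvTZ (m : Nat) : Nat :=
  if h : m % 2 = 0 ∧ m ≠ 0 then pvTZ (m / 2) + 1 else 0
decreasing_by exact Nat.div_lt_self (Nat.pos_of_ne_zero h.2) (by omega)

-- `take = tz if max_steps is None else min(tz, max_steps - steps)`, capped by the remaining fuel
def pvTake (ms : Option Int) (steps n : Int) (avail : Nat) : Nat :=
  min (match ms with
       | none => pvTZ n.natAbs
       | some m => min (pvTZ n.natAbs) (m - steps).toNat) avail

theorem pvTZ_pos (m : Nat) (he : m % 2 = 0) (h0 : m ≠ 0) : 1 ≤ pvTZ m := by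
  rw [pvTZ]; simp [he, h0]

theorem pvTake_pos (ms : Option Int) (steps n : Int) (avail : Nat)
    (hn : 1 < n) (he : PySem.Int.mod n 2 = 0) (hb : ¬ pvBudgetHit ms steps = true)
    (ha : 1 ≤ avail) : 1 ≤ pvTake ms steps n avail := by
  have hdvd : (2 : Int) ∣ n := (PySem.Int.mod_eq_zero_iff_dvd n 2).mp he
  have he' : n.natAbs % 2 = 0 := by omega
  have h0 : n.natAbs ≠ 0 := by omega
  have htz := pvTZ_pos n.natAbs he' h0
  unfold pvTake
  cases ms with
  | none => simp only [le_min_iff]; exact ⟨htz, ha⟩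
  | some m =>
    have hlt : steps < m := by
      by_contra h
      exact hb (by simp [pvBudgetHit]; omega)
    simp only [le_min_iff]
    exact ⟨⟨htz, by omega⟩, ha⟩

-- B's odd-to-odd walk: odd step = one fuel unit; a run of halvings is one shift consuming its length in fuel
def pvLoopB : Nat → Option Int → Int → Int → List Int → (List Int × Int × Int)
  | 0, _, n, steps, seq => (seq, n, steps)
  | fuel+1, ms, n, steps, seq =>
    if h1 : 1 < n then
      if h2 : pvBudgetHit ms steps then
        ((if PySem.Int.mod n 2 ≠ 0 then seq ++ [n] else seq), n, steps)
      else if h3 : PySem.Int.mod n 2 ≠ 0 then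
        pvLoopB fuel ms (3 * n + 1) (steps + 1) (seq ++ [n])
      else
        let t := pvTake ms steps n (fuel + 1)
        pvLoopB (fuel + 1 - t) ms (PySem.Int.floordiv n (2 ^ t)) (steps + (t : Int)) seq
    else (seq, n, steps)
  termination_by fuel _ _ _ _ => fuel
  decreasing_by
    · omega
    · have := pvTake_pos ms steps n (fuel + 1) h1 (by omega) h2 (by omega)
      omega

def get_collatz_odd_sequence_alt (n_start : Int) (max_steps : Option Int) : List Int :=
  if n_start ≤ 0 then []
  else
    match pvLoopB pvFuel max_steps n_start 0 [] with
    | (seq, n, steps) =>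
      if (n == 1 && (match max_steps with | none => true | some m => decide (steps < m))) then
        (if (1 : Int) ∈ seq then seq else seq ++ [1])
      else seq

-- ===== PRECONDITION & SPEC =====
def Spec_get_collatz_odd_sequence (n_start : Int) (max_steps : Option Int) (out : List Int) : Prop := out = get_collatz_odd_sequence_alt n_start max_steps
instance (n_start : Int) (max_steps : Option Int) (out : List Int) : Decidable (Spec_get_collatz_odd_sequence n_start max_steps out) := by unfold Spec_get_collatz_odd_sequence; infer_instance

-- ===== CLAIM (what is proved, stated in full; the proofs are below) =====
def Claim_equal_get_collatz_odd_sequence : Prop := ∀ (n_start : Int) (max_steps : Option Int), Dom_get_collatz_odd_sequence n_start max_steps → Spec_get_collatz_odd_sequence n_start max_steps (get_collatz_odd_sequence n_start max_steps)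

-- ===== LEMMAS AND PROOFS =====

theorem pvTZ_dvd (m : Nat) : 2 ^ (pvTZ m) ∣ m := by
  induction m using Nat.strong_induction_on with
  | _ m ih =>
    rw [pvTZ]
    split
    · next h =>
      obtain ⟨c, hc⟩ := ih (m / 2) (Nat.div_lt_self (Nat.pos_of_ne_zero h.2) (by omega))
      refine ⟨c, ?_⟩
      have hm : m = 2 * (m / 2) := by omega
      rw [pow_succ]
      generalize 2 ^ pvTZ (m / 2) = p at hc ⊢
      rw [hm, hc]; ring
    · simp

-- A performs t consecutive halving steps when 2^t divides n (within fuel and budget)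
theorem pvLoopA_shift (t : Nat) : ∀ (fuel : Nat) (ms : Option Int) (n steps : Int) (seq : List Int),
    t ≤ fuel → (2 ^ t : Int) ∣ n → 0 < n →
    (∀ m, ms = some m → steps + (t : Int) ≤ m) →
    pvLoopA fuel ms n steps seq = pvLoopA (fuel - t) ms (n / 2 ^ t) (steps + (t : Int)) seq := by
  induction t with
  | zero => intro fuel ms n steps seq _ _ _ _; simp
  | succ t ih =>
    intro fuel ms n steps seq hf hd hp hb
    cases fuel with
    | zero => omega
    | succ f =>
      obtain ⟨k, hk⟩ := hd
      have hpow : (0 : Int) < 2 ^ (t + 1) := by positivity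
      have hpow2 : (2 : Int) ≤ 2 ^ (t + 1) := by
        calc (2 : Int) = 2 ^ 1 := (pow_one 2).symm
        _ ≤ 2 ^ (t + 1) := pow_le_pow_right₀ (by norm_num) (by omega)
      have hk0 : 0 < k := by nlinarith
      have hn1 : 1 < n := by nlinarith
      have heven : PySem.Int.mod n 2 = 0 := by
        rw [PySem.Int.mod_eq_zero_iff_dvd]
        exact ⟨2 ^ t * k, by rw [hk]; ring⟩
      have hbh : ¬ pvBudgetHit ms steps = true := by
        cases ms with
        | none => simp [pvBudgetHit]
        | some m =>
          have := hb m rfl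
          simp only [pvBudgetHit, decide_eq_true_eq]
          push_cast at this; omega
      have hn2 : n / 2 = 2 ^ t * k := by
        rw [hk, show (2 : Int) ^ (t + 1) * k = 2 * (2 ^ t * k) by ring]
        exact Int.mul_ediv_cancel_left _ (by norm_num)
      show pvLoopA (f + 1) ms n steps seq = _
      rw [pvLoopA, if_pos hn1, if_neg (by simp [hbh]), if_neg (not_not_intro heven),
        PySem.Int.floordiv_eq_ediv_of_pos (by norm_num)]
      rw [ih f ms (n / 2) (steps + 1) seq (by omega)
        ⟨k, hn2⟩ (by rw [hn2]; positivity)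
        (by intro m hm; have := hb m hm; push_cast at this ⊢; omega)]
      rw [show f + 1 - (t + 1) = f - t from by omega]
      rw [show n / 2 / 2 ^ t = n / 2 ^ (t + 1) from by
        rw [hn2, Int.mul_ediv_cancel_left _ (by positivity), hk,
          Int.mul_ediv_cancel_left _ (by positivity)]]
      rw [show steps + 1 + (t : Int) = steps + ((t + 1 : Nat) : Int) from by push_cast; ring]

-- the two loops agree on every positive n, same fuel
theorem pvLoops_eq (fuel : Nat) : ∀ (ms : Option Int) (n steps : Int) (seq : List Int),
    0 < n → pvLoopB fuel ms n steps seq = pvLoopA fuel ms n steps seq := by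
  induction fuel using Nat.strong_induction_on with
  | _ fuel ih =>
    intro ms n steps seq hp
    cases fuel with
    | zero => rw [pvLoopB, pvLoopA]
    | succ f =>
      by_cases hn1 : 1 < n
      · by_cases hb : pvBudgetHit ms steps = true
        · rw [pvLoopB, pvLoopA, dif_pos hn1, dif_pos hb, if_pos hn1, if_pos hb]
        · by_cases ho : PySem.Int.mod n 2 ≠ 0
          · rw [pvLoopB, pvLoopA, dif_pos hn1, dif_neg hb, dif_pos ho,
              if_pos hn1, if_neg hb, if_pos ho]
            exact ih f (by omega) ms (3 * n + 1) (steps + 1) (seq ++ [n]) (by omega)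
          · rw [not_not] at ho
            have ht1 : 1 ≤ pvTake ms steps n (f + 1) :=
              pvTake_pos ms steps n (f + 1) hn1 ho hb (by omega)
            have htle : pvTake ms steps n (f + 1) ≤ f + 1 := by
              exact min_le_right _ _
            have htz : pvTake ms steps n (f + 1) ≤ pvTZ n.natAbs := by
              cases ms <;> simp only [pvTake] <;> omega
            set t := pvTake ms steps n (f + 1) with htdef
            have hdvd : (2 ^ t : Int) ∣ n := by
              have h2 : 2 ^ t ∣ n.natAbs := dvd_trans (pow_dvd_pow 2 htz) (pvTZ_dvd n.natAbs)
              have h3 : ((2 ^ t : Nat) : Int) ∣ ((n.natAbs : Nat) : Int) :=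
                Int.natCast_dvd_natCast.mpr h2
              rwa [Int.natAbs_of_nonneg (le_of_lt hp), Nat.cast_pow, Nat.cast_ofNat] at h3
            have hbud : ∀ m, ms = some m → steps + (t : Int) ≤ m := by
              intro m hm
              have hlt : steps < m := by
                rw [hm] at hb; simp only [pvBudgetHit, decide_eq_true_eq] at hb; omega
              have : t ≤ (m - steps).toNat := by
                rw [htdef, hm]; simp only [pvTake]; omega
              omega
            obtain ⟨k, hk⟩ := hdvd
            have hppos : (0 : Int) < 2 ^ t := by positivity
            have hk0 : 0 < k := by nlinarith
            rw [pvLoopB, dif_pos hn1, dif_neg hb, dif_neg (not_not_intro ho)]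
            simp only [← htdef]
            rw [PySem.Int.floordiv_eq_ediv_of_pos hppos]
            rw [ih (f + 1 - t) (by omega) ms (n / 2 ^ t) (steps + (t : Int)) seq
              (by rw [hk, Int.mul_ediv_cancel_left _ (by positivity)]; omega)]
            exact (pvLoopA_shift t (f + 1) ms n steps seq htle ⟨k, hk⟩ hp hbud).symm
      · rw [pvLoopB, pvLoopA, dif_neg hn1, if_neg hn1]

-- ===== VERDICT (by name: the statement is the Claim_ definition above) =====
theorem get_collatz_odd_sequence_spec : Claim_equal_get_collatz_odd_sequence := by
  intro n_start max_steps _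
  unfold Spec_get_collatz_odd_sequence get_collatz_odd_sequence get_collatz_odd_sequence_alt
  by_cases h : n_start ≤ 0
  · simp [h]
  · rw [if_neg h, if_neg h, pvLoops_eq pvFuel max_steps n_start 0 [] (by omega)]
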